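-- pv_equiv track=rewrite | github.com/ShivamCholin/encryption-algo | PlayFair Cipher.py | settxt
-- ===== SOURCE A (Python) =====
-- def settxt(txt):
--     if len(txt)%2 == 0 and txt[-1]=='X': txt.pop()
--     i=0
--     while i < len(txt):
--         try:
--             if txt[i]==txt[i+2] and txt[i+1]=='X' : txt.pop(i+1)
--         except: ''
--         i += 1
--     return txt
-- ===== SOURCE B (Python) =====
-- def settxt(txt):
--     if len(txt) % 2 == 0 and txt[-1] == 'X':
--         txt.pop()
--     out = []
--     skip = False
--     for c in txt:
--         if not skip and len(out) >= 2 and out[-1] == 'X' and out[-2] == c: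
--             out.pop()
--             skip = True
--         else:
--             skip = False
--         out.append(c)
--     txt[:] = out
--     return txt
-- ===== Notes on version B (the rewrite author's own statement) =====
-- stated objective: alternative
-- what changed: Replaced A's index-scanning while loop with try/except and in-place mid-list pops by a single left-to-right stack build that drops the top 'X' when the incoming element sandwiches it between equal neighbours (skipping the check on the element right after a removal, as A's scan does).
import Mathlib
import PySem

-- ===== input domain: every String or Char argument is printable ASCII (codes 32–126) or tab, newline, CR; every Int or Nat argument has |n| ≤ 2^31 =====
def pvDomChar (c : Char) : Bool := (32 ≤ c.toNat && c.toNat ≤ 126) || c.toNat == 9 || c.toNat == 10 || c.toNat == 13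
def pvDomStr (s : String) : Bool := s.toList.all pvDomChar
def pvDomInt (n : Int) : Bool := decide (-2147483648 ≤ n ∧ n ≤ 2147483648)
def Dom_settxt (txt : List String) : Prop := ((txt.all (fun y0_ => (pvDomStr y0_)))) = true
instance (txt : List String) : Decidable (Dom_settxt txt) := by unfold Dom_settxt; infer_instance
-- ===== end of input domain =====

-- B replaces A's index-scanning while loop (with try/except and in-place mid-list pops) by a
-- single left-to-right stack build; A mutates txt in place and B mirrors that mutation — the
-- equivalence proved here is about the return value.

-- ===== PORT A =====
-- the try/except around txt[i]==txt[i+2] catches exactly the IndexError when i+2 is out of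
-- range (indices here are nonnegative, so the range check is exact); txt.pop(i+1) = eraseIdx
def settxtLoop (txt : List String) (i : Nat) : List String :=
  if _h : i < txt.length then
    if h2 : i + 2 < txt.length then
      if txt[i]'(by omega) == txt[i+2]'h2 && txt[i+1]'(by omega) == "X" then
        settxtLoop (txt.eraseIdx (i+1)) (i+1)
      else settxtLoop txt (i+1)
    else settxtLoop txt (i+1)
  else txt
termination_by txt.length - i
decreasing_by
  · have h3 : i + 1 < txt.length := by omega
    simp [List.length_eraseIdx, h3]
    omega
  · omega
  · omega

def settxt (txt : List String) : List String :=
  let t := if txt.length % 2 == 0 && (PySem.List.pyGet? txt (-1) == some "X")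
           then txt.dropLast else txt
  settxtLoop t 0

-- ===== PORT B =====
-- out.pop(); out.append(c) = out.dropLast ++ [c]
def settxtAltLoop : List String → List String → Bool → List String
  | [], out, _ => out
  | c :: rest, out, skip =>
    if !skip && decide (2 ≤ out.length)
       && (PySem.List.pyGet? out (-1) == some "X")
       && (PySem.List.pyGet? out (-2) == some c)
    then settxtAltLoop rest (out.dropLast ++ [c]) true
    else settxtAltLoop rest (out ++ [c]) false

def settxt_alt (txt : List String) : List String :=
  let t := if !txt.isEmpty && txt.length % 2 == 0 && (PySem.List.pyGet? txt (-1) == some "X")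
           then txt.dropLast else txt
  settxtAltLoop t [] false

-- ===== PRECONDITION & SPEC =====
-- Pre_ excludes only the empty list, on which A raises IndexError at txt[-1]
def Pre_settxt (txt : List String) : Prop := txt ≠ []
instance (txt : List String) : Decidable (Pre_settxt txt) := by unfold Pre_settxt; infer_instance
def pvWitness_settxt : List String := ["A", "X", "A"]

def Spec_settxt (txt : List String) (out : List String) : Prop := out = settxt_alt txt
instance (txt : List String) (out : List String) : Decidable (Spec_settxt txt out) := by unfold Spec_settxt; infer_instance

-- ===== CLAIM (what is proved, stated in full; the proofs are below) =====
def Claim_equal_settxt : Prop := ∀ (txt : List String), Dom_settxt txt → Pre_settxt txt → Spec_settxt txt (settxt txt)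

-- ===== LEMMAS AND PROOFS =====

-- once the look-ahead window falls off the end, A's loop changes nothing
lemma settxtLoop_of_ge (txt : List String) (i : Nat) (h : txt.length ≤ i + 2) :
    settxtLoop txt i = txt := by
  rw [settxtLoop]
  by_cases h1 : i < txt.length
  · rw [dif_pos h1, dif_neg (by omega)]
    exact settxtLoop_of_ge txt (i+1) (by omega)
  · rw [dif_neg h1]
termination_by txt.length - i

-- B's first two pushes never pop (stack too short)
lemma alt_start (L : List String) :
    settxtAltLoop L [] false = settxtAltLoop (L.drop 2) (L.take 2) false := by
  match L with
  | [] => rfl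
  | [c] => simp [settxtAltLoop]
  | c :: d :: rest => simp [settxtAltLoop, PySem.List.pyGet?]

-- B's unconditional push right after a removal (the skip step)
lemma alt_skip_step (c : String) (rest out : List String) :
    settxtAltLoop (c :: rest) out true = settxtAltLoop rest (out ++ [c]) false := by
  rw [settxtAltLoop.eq_def]
  simp

-- main invariant: A's scan at index i equals B's stack build with the first i+2
-- elements already pushed (no pending skip)
lemma loop_eq (L : List String) (i : Nat) :
    settxtLoop L i = settxtAltLoop (L.drop (i+2)) (L.take (i+2)) false := by
  by_cases h2 : i + 2 < L.length
  case neg =>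
    rw [settxtLoop_of_ge L i (by omega), List.drop_eq_nil_of_le (by omega),
        List.take_of_length_le (by omega)]
    rfl
  case pos =>
    have hlen : (L.take (i+2)).length = i + 2 := by simp [List.length_take]; omega
    have hm1 : PySem.List.pyGet? (L.take (i+2)) (-1) = some (L[i+1]'(by omega)) := by
      rw [PySem.List.pyGet?_neg_ofNat _ 1 (by omega) (by omega), hlen]
      simp [List.getElem?_eq_getElem (show i+1 < L.length by omega)]
    have hm2 : PySem.List.pyGet? (L.take (i+2)) (-2) = some (L[i]'(by omega)) := by
      rw [PySem.List.pyGet?_neg_ofNat _ 2 (by omega) (by omega), hlen]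
      simp [List.getElem?_eq_getElem (show i < L.length by omega)]
    rw [List.drop_eq_getElem_cons h2]
    rw [settxtLoop, dif_pos (by omega), dif_pos h2]
    rw [settxtAltLoop.eq_def]
    simp only [hm1, hm2, hlen, Bool.not_false, Bool.true_and]
    by_cases hE : L[i]'(by omega) = L[i+2]'h2
    · by_cases hX : L[i+1]'(by omega) = "X"
      · -- pop branch on both sides
        rw [if_pos (by simp [hE, hX]), if_pos (by simp [hE, hX])]
        rw [loop_eq (L.eraseIdx (i+1)) (i+1)]
        have hL' : L.eraseIdx (i+1) = L.take (i+1) ++ L.drop (i+2) :=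
          List.eraseIdx_eq_take_drop_succ L (i+1)
        have hdl : (L.take (i+2)).dropLast = L.take (i+1) := by
          rw [List.dropLast_take h2, show i+2-1 = i+1 from rfl]
        have hlen1 : (L.take (i+1)).length = i + 1 := by
          simp [List.length_take]; omega
        have hdrop : (L.eraseIdx (i+1)).drop (i+3) = L.drop (i+4) := by
          rw [hL', List.drop_append, hlen1, List.drop_eq_nil_of_le (by omega),
              List.nil_append, show i+3-(i+1) = 2 from by omega, List.drop_drop]
        have htake : (L.eraseIdx (i+1)).take (i+3) = L.take (i+1) ++ (L.drop (i+2)).take 2 := by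
          rw [hL', List.take_append, hlen1, List.take_of_length_le (by omega),
              show i+3-(i+1) = 2 from by omega]
        rw [show i+1+2 = i+3 from rfl, hdrop, htake, hdl]
        by_cases h3 : i + 3 < L.length
        · -- one more element follows: B pushes it unconditionally (the skip step)
          have hd2 : L.drop (i+2) = L[i+2]'h2 :: L[i+3]'h3 :: L.drop (i+4) := by
            rw [List.drop_eq_getElem_cons h2, List.drop_eq_getElem_cons h3]
          rw [List.drop_eq_getElem_cons h3, alt_skip_step,
              show i+3+1 = i+4 from rfl, hd2, List.append_assoc]
          rfl
        · -- the popped window was the end of the list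
          have hlast : L.drop (i+2) = [L[i+2]'h2] := by
            rw [List.drop_eq_getElem_cons h2, List.drop_eq_nil_of_le (by omega)]
          rw [List.drop_eq_nil_of_le (show L.length ≤ i+3 by omega), hlast,
              List.drop_eq_nil_of_le (show L.length ≤ i+4 by omega)]
          simp [settxtAltLoop]
      · rw [if_neg (by simp [hX]), if_neg (by simp [hX])]
        rw [loop_eq L (i+1)]
        have : L.take (i+1+2) = L.take (i+2) ++ [L[i+2]'h2] := by
          rw [List.take_add_one]
          simp [List.getElem?_eq_getElem h2]
        rw [show i+1+2 = i+3 from rfl] at this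
        rw [show i+2+1 = i+3 from rfl, this]
    · rw [if_neg (by simp [hE]), if_neg (by simp [hE])]
      rw [loop_eq L (i+1)]
      have : L.take (i+3) = L.take (i+2) ++ [L[i+2]'h2] := by
        rw [show i+3 = (i+2)+1 from rfl, List.take_add_one]
        simp [List.getElem?_eq_getElem h2]
      rw [show i+2+1 = i+3 from rfl, this]
termination_by L.length - i
decreasing_by
  · have h4 : i + 1 < L.length := by omega
    simp [List.length_eraseIdx, h4]; omega
  · omega
  · omega

-- ===== VERDICT (by name: the statement is the Claim_ definition above) =====
theorem settxt_spec : Claim_equal_settxt := by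
  intro txt _ hpre
  show settxt txt = settxt_alt txt
  unfold settxt settxt_alt
  have hpre' : txt ≠ [] := hpre
  have hne : txt.isEmpty = false := by simp [hpre']
  simp only [hne, Bool.not_false, Bool.true_and]
  rw [loop_eq, alt_start]
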